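-- pv_equiv track=rewrite | github.com/ChiWoo-Shin/Algorithm_ | programmers/python/133499_scw.py | solution
-- ===== SOURCE A (Python) =====
-- from collections import deque
--
-- def solution(babbling):
--     answer = 0
--     pron = ["aya", "ye", "woo", "ma"]
--
--     for word in babbling:
--         prev=''
--         word = deque(word)
--         temp=''
--         while word:
--             x = word.popleft()
--             if len(temp)==0:
--                 temp +=x
--             else:
--                 temp+=x
--                 if temp in pron and prev != temp:
--                     prev = temp
--                     temp=''
--         if temp == '':
--             answer +=1
--
--     return answer
-- ===== SOURCE B (Python) =====
-- def solution(babbling):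
--     tokens = ("aya", "ye", "woo", "ma")
--
--     def pronounceable(rest, prev):
--         if not rest:
--             return True
--         for p in tokens:
--             if p != prev and rest.startswith(p):
--                 return pronounceable(rest[len(p):], p)
--         return False
--
--     return sum(pronounceable(word, '') for word in babbling)
-- ===== Notes on version B (the rewrite author's own statement) =====
-- stated objective: simpler
-- what changed: Replaced A's per-character deque pop with buffer accumulation by a recursive whole-token prefix matcher that drops a matched token from the front of the word.
import Mathlib
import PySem

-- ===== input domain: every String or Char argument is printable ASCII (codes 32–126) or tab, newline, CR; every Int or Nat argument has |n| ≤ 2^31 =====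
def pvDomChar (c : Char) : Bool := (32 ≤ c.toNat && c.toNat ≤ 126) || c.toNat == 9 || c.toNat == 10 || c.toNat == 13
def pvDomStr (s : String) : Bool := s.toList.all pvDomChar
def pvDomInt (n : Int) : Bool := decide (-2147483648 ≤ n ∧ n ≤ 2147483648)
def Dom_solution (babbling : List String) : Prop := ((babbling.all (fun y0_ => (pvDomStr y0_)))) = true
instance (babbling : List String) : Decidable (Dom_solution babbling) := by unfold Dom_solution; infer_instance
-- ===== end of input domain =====

-- B replaces A's per-character deque/buffer accumulation by a recursive whole-token
-- prefix matcher (simpler decomposition, same cost); return values only, no mutation.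

-- ===== PORT A =====
-- Strings are handled as lists of characters (PySem.Chars convention): the deque of
-- characters, the buffer `temp` and `prev` are List Char; '' is [].
def pronA : List (List Char) := [['a','y','a'], ['y','e'], ['w','o','o'], ['m','a']]

-- the `while word:` loop of A: pops the front character, grows `temp`, resets on a match
def loopA : List Char → List Char → List Char → List Char
  | [], _, temp => temp
  | x :: word, prev, temp =>
    if temp.length = 0 then loopA word prev (temp ++ [x])
    else
      let temp' := temp ++ [x]
      if temp' ∈ pronA ∧ prev ≠ temp' then loopA word temp' []
      else loopA word prev temp'

def solution (babbling : List String) : Int :=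
  babbling.foldl (fun answer word =>
    if loopA word.toList [] [] = [] then answer + 1 else answer) 0

-- ===== PORT B =====
-- `pronounceable(rest, prev)` of Source B; the `for p in tokens` scan is the if-chain.
def pronB : List Char → List Char → Bool
  | [], _ => true
  | c :: cs, prev =>
    if prev ≠ ['a','y','a'] ∧ List.isPrefixOf ['a','y','a'] (c :: cs) then
      pronB ((c :: cs).drop 3) ['a','y','a']
    else if prev ≠ ['y','e'] ∧ List.isPrefixOf ['y','e'] (c :: cs) then
      pronB ((c :: cs).drop 2) ['y','e']
    else if prev ≠ ['w','o','o'] ∧ List.isPrefixOf ['w','o','o'] (c :: cs) then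
      pronB ((c :: cs).drop 3) ['w','o','o']
    else if prev ≠ ['m','a'] ∧ List.isPrefixOf ['m','a'] (c :: cs) then
      pronB ((c :: cs).drop 2) ['m','a']
    else false
termination_by chars _ => chars.length
decreasing_by all_goals simp

def solution_alt (babbling : List String) : Int :=
  (babbling.map (fun word => if pronB word.toList [] then (1 : Int) else 0)).sum

-- ===== PRECONDITION & SPEC =====
def Spec_solution (babbling : List String) (out : Int) : Prop := out = solution_alt babbling
instance (babbling : List String) (out : Int) : Decidable (Spec_solution babbling out) := by unfold Spec_solution; infer_instance

-- ===== CLAIM (what is proved, stated in full; the proofs are below) =====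
def Claim_equal_solution : Prop := ∀ (babbling : List String), Dom_solution babbling → Spec_solution babbling (solution babbling)

-- ===== LEMMAS AND PROOFS =====

-- Once the buffer is non-empty, A's loop can only finish empty if some allowed token
-- extends the buffer along the remaining characters; otherwise it is stuck.
lemma loopA_stuck : ∀ (chars temp prev : List Char), temp ≠ [] →
    (∀ t ∈ pronA, prev ≠ t → ¬ (temp <+: t ∧ t <+: temp ++ chars)) →
    loopA chars prev temp ≠ [] := by
  intro chars
  induction chars with
  | nil => intro temp prev h _; simpa [loopA] using h
  | cons x rest ih =>
    intro temp prev htemp h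
    rw [loopA]
    rw [if_neg (by simpa using htemp)]
    rw [if_neg]
    · apply ih (temp ++ [x]) prev (by simp)
      intro t ht hp ⟨h1, h2⟩
      exact h t ht hp ⟨(List.prefix_append temp [x]).trans h1,
        by simp [List.append_assoc] at h2 ⊢; exact h2⟩
    · rintro ⟨hm, hp⟩
      exact h _ hm hp ⟨List.prefix_append temp [x],
        by simpa [List.append_assoc] using (List.prefix_append (temp ++ [x]) rest)⟩

lemma consume_aya (rest prev : List Char) (h : prev ≠ ['a','y','a']) :
    loopA (['a','y','a'] ++ rest) prev [] = loopA rest ['a','y','a'] [] := by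
  simp [loopA, pronA, h]

lemma consume_ye (rest prev : List Char) (h : prev ≠ ['y','e']) :
    loopA (['y','e'] ++ rest) prev [] = loopA rest ['y','e'] [] := by
  simp [loopA, pronA, h]

lemma consume_woo (rest prev : List Char) (h : prev ≠ ['w','o','o']) :
    loopA (['w','o','o'] ++ rest) prev [] = loopA rest ['w','o','o'] [] := by
  simp [loopA, pronA, h]

lemma consume_ma (rest prev : List Char) (h : prev ≠ ['m','a']) :
    loopA (['m','a'] ++ rest) prev [] = loopA rest ['m','a'] [] := by
  simp [loopA, pronA, h]

lemma main_word : ∀ (n : ℕ) (chars prev : List Char), chars.length ≤ n →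
    (loopA chars prev [] = [] ↔ pronB chars prev = true) := by
  intro n
  induction n with
  | zero =>
    intro chars prev h
    have hc : chars = [] := List.eq_nil_of_length_eq_zero (Nat.le_zero.mp h)
    subst hc; simp [loopA, pronB]
  | succ n ih =>
    intro chars prev h
    match chars with
    | [] => simp [loopA, pronB]
    | c :: cs =>
      by_cases hm : ∃ t ∈ pronA, prev ≠ t ∧ t <+: (c :: cs)
      · obtain ⟨t, ht, hp, hpre⟩ := hm
        obtain ⟨rest, hrest⟩ := hpre
        simp only [pronA, List.mem_cons, List.not_mem_nil, or_false] at ht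
        rcases ht with rfl | rfl | rfl | rfl
        · rw [← hrest, consume_aya rest prev hp]
          have hB : pronB (['a','y','a'] ++ rest) prev = pronB rest ['a','y','a'] := by
            simp [pronB, hp, List.isPrefixOf]
          rw [hB]
          exact ih rest _ (by rw [← hrest] at h; simp at h; omega)
        · rw [← hrest, consume_ye rest prev hp]
          have hB : pronB (['y','e'] ++ rest) prev = pronB rest ['y','e'] := by
            simp [pronB, hp, List.isPrefixOf]
          rw [hB]
          exact ih rest _ (by rw [← hrest] at h; simp at h; omega)
        · rw [← hrest, consume_woo rest prev hp]
          have hB : pronB (['w','o','o'] ++ rest) prev = pronB rest ['w','o','o'] := by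
            simp [pronB, hp, List.isPrefixOf]
          rw [hB]
          exact ih rest _ (by rw [← hrest] at h; simp at h; omega)
        · rw [← hrest, consume_ma rest prev hp]
          have hB : pronB (['m','a'] ++ rest) prev = pronB rest ['m','a'] := by
            simp [pronB, hp, List.isPrefixOf]
          rw [hB]
          exact ih rest _ (by rw [← hrest] at h; simp at h; omega)
      · push_neg at hm
        have hstep : loopA (c :: cs) prev [] = loopA cs prev [c] := by
          rw [loopA]; simp
        have hA : loopA (c :: cs) prev [] ≠ [] := by
          rw [hstep]
          apply loopA_stuck cs [c] prev (by simp)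
          rintro t ht hp ⟨h1, h2⟩
          exact hm t ht hp (by simp at h2; exact h2)
        have hB : pronB (c :: cs) prev = false := by
          simp only [pronB]
          split_ifs with h1 h2 h3 h4
          · exact (hm _ (by simp [pronA]) h1.1 (List.isPrefixOf_iff_prefix.mp h1.2)).elim
          · exact (hm _ (by simp [pronA]) h2.1 (List.isPrefixOf_iff_prefix.mp h2.2)).elim
          · exact (hm _ (by simp [pronA]) h3.1 (List.isPrefixOf_iff_prefix.mp h3.2)).elim
          · exact (hm _ (by simp [pronA]) h4.1 (List.isPrefixOf_iff_prefix.mp h4.2)).elim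
          · rfl
        exact iff_of_false hA (by simp [hB])

lemma fold_sum : ∀ (l : List String) (acc : Int),
    l.foldl (fun answer word => if loopA word.toList [] [] = [] then answer + 1 else answer) acc
      = acc + (l.map (fun word => if pronB word.toList [] then (1 : Int) else 0)).sum := by
  intro l
  induction l with
  | nil => intro acc; simp
  | cons w ws ihw =>
    intro acc
    simp only [List.foldl, List.map_cons, List.sum_cons]
    rw [ihw]
    by_cases hw : loopA w.toList [] [] = []
    · have ht : pronB w.toList [] = true := (main_word w.toList.length _ _ le_rfl).mp hw
      simp only [hw, if_true, ht]; ring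
    · have ht : pronB w.toList [] = false := by
        cases hb : pronB w.toList [] with
        | false => rfl
        | true => exact absurd ((main_word w.toList.length _ _ le_rfl).mpr hb) hw
      simp [hw, ht]

theorem solution_spec : Claim_equal_solution := by
  unfold Claim_equal_solution Spec_solution
  intro babbling _
  unfold solution solution_alt
  rw [fold_sum]
  simp
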